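-- pv_equiv track=rewrite | github.com/valterstra/ML-MSc-thesis | src/careai/hosp_daily/build_v3.py | careunit_to_group
-- ===== SOURCE A (Python) =====
-- _ICU_UNITS = {
--     "Medical Intensive Care Unit (MICU)",
--     "Surgical Intensive Care Unit (SICU)",
--     "Cardiac Vascular Intensive Care Unit (CVICU)",
--     "Coronary Care Unit (CCU)",
--     "Neuro Surgical Intensive Care Unit (Neuro SICU)",
--     "Medical/Surgical Intensive Care Unit (MICU/SICU)",
-- }
--
-- def careunit_to_group(unit: str | None) -> str:
--     if unit is None:
--         return "other"
--     if unit in _ICU_UNITS or "Intensive Care" in unit: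
--         return "icu"
--     if "Emergency Department" in unit:
--         return "ed"
--     if any(x in unit for x in ["Med/Surg", "Medicine"]):
--         return "medicine"
--     if "Labor" in unit or "Obstetric" in unit:
--         return "obstetrics"
--     if "Hematology" in unit or "Oncology" in unit:
--         return "oncology"
--     if "Neurology" in unit:
--         return "neurology"
--     if "Psychiatry" in unit:
--         return "psychiatry"
--     if any(x in unit for x in ["Surgery", "Vascular", "Transplant"]):
--         return "surgery"
--     return "other"
-- ===== SOURCE B (Python) =====
-- _ICU_UNITS = {
--     "Medical Intensive Care Unit (MICU)",
--     "Surgical Intensive Care Unit (SICU)",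
--     "Cardiac Vascular Intensive Care Unit (CVICU)",
--     "Coronary Care Unit (CCU)",
--     "Neuro Surgical Intensive Care Unit (Neuro SICU)",
--     "Medical/Surgical Intensive Care Unit (MICU/SICU)",
-- }
--
-- # every keyword with the priority of the group it selects
-- _KEYWORD_PRIORITY = [
--     ("Intensive Care", 0),
--     ("Emergency Department", 1),
--     ("Med/Surg", 2), ("Medicine", 2),
--     ("Labor", 3), ("Obstetric", 3),
--     ("Hematology", 4), ("Oncology", 4),
--     ("Neurology", 5),
--     ("Psychiatry", 6),
--     ("Surgery", 7), ("Vascular", 7), ("Transplant", 7),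
-- ]
--
-- _LABELS = ["icu", "ed", "medicine", "obstetrics", "oncology",
--            "neurology", "psychiatry", "surgery"]
--
-- def careunit_to_group(unit):
--     # exhaustive matching + min-priority selection instead of a first-match cascade
--     if unit is None:
--         return "other"
--     matches = [p for kw, p in _KEYWORD_PRIORITY if kw in unit]
--     if unit in _ICU_UNITS:
--         matches.append(0)
--     if not matches:
--         return "other"
--     return _LABELS[min(matches)]
-- ===== Notes on version B (the rewrite author's own statement) =====
-- stated objective: alternative
-- what changed: B replaces A's short-circuiting if-cascade by exhaustive matching: it collects the priorities of ALL keywords occurring in the unit (plus priority 0 for exact ICU-set membership) and returns the label of the minimum priority, or the default group when nothing matched.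
import Mathlib
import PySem

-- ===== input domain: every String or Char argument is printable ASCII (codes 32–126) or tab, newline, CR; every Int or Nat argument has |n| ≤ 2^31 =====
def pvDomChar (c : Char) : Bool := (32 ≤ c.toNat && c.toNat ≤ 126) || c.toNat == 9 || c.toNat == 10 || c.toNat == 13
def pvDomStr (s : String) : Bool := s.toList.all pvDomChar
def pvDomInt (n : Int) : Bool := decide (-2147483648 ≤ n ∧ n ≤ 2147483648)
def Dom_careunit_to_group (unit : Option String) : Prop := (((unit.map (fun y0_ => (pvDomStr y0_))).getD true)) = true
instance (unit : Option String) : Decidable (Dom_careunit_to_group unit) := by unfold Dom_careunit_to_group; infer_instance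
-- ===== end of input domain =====

-- B collects all matching keywords with priorities and selects the minimum-priority label, instead of A's short-circuiting if-cascade (alternative decomposition, same cost).


-- ===== PORT A =====
def icuUnits : PySem.Set String := PySem.Set.ofList
  [ "Medical Intensive Care Unit (MICU)"
  , "Surgical Intensive Care Unit (SICU)"
  , "Cardiac Vascular Intensive Care Unit (CVICU)"
  , "Coronary Care Unit (CCU)"
  , "Neuro Surgical Intensive Care Unit (Neuro SICU)"
  , "Medical/Surgical Intensive Care Unit (MICU/SICU)" ]

def careunit_to_group (unit : Option String) : String :=
  match unit with
  | none => "other"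
  | some u =>
    if PySem.Set.contains icuUnits u || PySem.Str.isIn "Intensive Care" u then "icu"
    else if PySem.Str.isIn "Emergency Department" u then "ed"
    else if (["Med/Surg", "Medicine"] : List String).any (fun x => PySem.Str.isIn x u) then "medicine"
    else if PySem.Str.isIn "Labor" u || PySem.Str.isIn "Obstetric" u then "obstetrics"
    else if PySem.Str.isIn "Hematology" u || PySem.Str.isIn "Oncology" u then "oncology"
    else if PySem.Str.isIn "Neurology" u then "neurology"
    else if PySem.Str.isIn "Psychiatry" u then "psychiatry"
    else if (["Surgery", "Vascular", "Transplant"] : List String).any (fun x => PySem.Str.isIn x u) then "surgery"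
    else "other"


-- ===== PORT B =====
def cuKeywordPriority : List (String × Nat) :=
  [ ("Intensive Care", 0)
  , ("Emergency Department", 1)
  , ("Med/Surg", 2), ("Medicine", 2)
  , ("Labor", 3), ("Obstetric", 3)
  , ("Hematology", 4), ("Oncology", 4)
  , ("Neurology", 5)
  , ("Psychiatry", 6)
  , ("Surgery", 7), ("Vascular", 7), ("Transplant", 7) ]

def cuLabels : List String :=
  ["icu", "ed", "medicine", "obstetrics", "oncology", "neurology", "psychiatry", "surgery"]

def careunit_to_group_alt (unit : Option String) : String :=
  match unit with
  | none => "other"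
  | some u =>
    let ms0 := cuKeywordPriority.foldr
      (fun kp acc => if PySem.Str.isIn kp.1 u then kp.2 :: acc else acc) []
    let ms := if PySem.Set.contains icuUnits u then ms0 ++ [0] else ms0
    match PySem.List.min? ms (fun p => p) with
    | none => "other"
    | some p => cuLabels.getD p "other"

-- ===== PRECONDITION & SPEC =====
def Spec_careunit_to_group (unit : Option String) (out : String) : Prop := out = careunit_to_group_alt unit
instance (unit : Option String) (out : String) : Decidable (Spec_careunit_to_group unit out) := by unfold Spec_careunit_to_group; infer_instance

-- ===== CLAIM (what is proved, stated in full; the proofs are below) =====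
def Claim_equal_careunit_to_group : Prop := ∀ (unit : Option String), Dom_careunit_to_group unit → Spec_careunit_to_group unit (careunit_to_group unit)

-- ===== LEMMAS AND PROOFS =====

-- proof-side model of B's comprehension and of A's cascade, over an abstract rule list
def cuBuild : List (Bool × Nat) → List Nat
  | [] => []
  | (b, p) :: r => if b then p :: cuBuild r else cuBuild r

def cuCascade : List (Bool × Nat) → String
  | [] => "other"
  | (b, p) :: r => if b then cuLabels.getD p "other" else cuCascade r

theorem cuBuild_lb (c : Nat) (rules : List (Bool × Nat))
    (h : ∀ bp ∈ rules, c ≤ bp.2) : ∀ q ∈ cuBuild rules, c ≤ q := by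
  induction rules with
  | nil => intro q hq; simp [cuBuild] at hq
  | cons bp r ih =>
    intro q hq
    obtain ⟨b, p⟩ := bp
    have hr : ∀ x ∈ cuBuild r, c ≤ x := ih (fun x hx => h x (List.mem_cons_of_mem _ hx))
    simp only [cuBuild] at hq
    split at hq
    · rcases List.mem_cons.mp hq with rfl | hq2
      · exact h (b, q) (by simp)
      · exact hr q hq2
    · exact hr q hq

theorem min?_eq_of_min {l : List Nat} {p : Nat} (hp : p ∈ l)
    (h : ∀ q ∈ l, p ≤ q) : PySem.List.min? l (fun x => x) = some p := by
  cases hm : PySem.List.min? l (fun x => x) with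
  | none =>
    rw [PySem.List.min?_eq_none_iff] at hm
    subst hm; cases hp
  | some m =>
    have h1 : m ∈ l := PySem.List.min?_mem hm
    have h2 : m ≤ p := PySem.List.min?_isMin hm p hp
    have h3 : p ≤ m := h m h1
    exact congrArg some (Nat.le_antisymm (by simpa using h2) h3)

theorem cuKey (rules : List (Bool × Nat))
    (hs : List.Pairwise (fun a b => a.2 ≤ b.2) rules) :
    (match PySem.List.min? (cuBuild rules) (fun x => x) with
      | none => "other"
      | some p => cuLabels.getD p "other") = cuCascade rules := by
  induction rules with
  | nil => simp [cuBuild, cuCascade, PySem.List.min?]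
  | cons bp r ih =>
    obtain ⟨b, p⟩ := bp
    rw [List.pairwise_cons] at hs
    by_cases hb : b
    · subst hb
      have hmin : PySem.List.min? (cuBuild ((true, p) :: r)) (fun x => x) = some p := by
        apply min?_eq_of_min
        · simp [cuBuild]
        · intro q hq
          simp only [cuBuild] at hq
          rcases List.mem_cons.mp hq with rfl | hq
          · exact le_refl q
          · exact cuBuild_lb p r (fun x hx => hs.1 x hx) q hq
      rw [hmin]
      simp [cuCascade]
    · simp only [Bool.not_eq_true] at hb
      subst hb
      simpa [cuBuild, cuCascade] using ih hs.2

theorem if_or' (a b : Prop) [Decidable a] [Decidable b] (x y : String) :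
    (if a then x else if b then x else y) = if a ∨ b then x else y := by
  by_cases ha : a <;> by_cases hb : b <;> simp [ha, hb]

-- ===== VERDICT =====
theorem careunit_to_group_spec : Claim_equal_careunit_to_group := by
  intro unit _
  unfold Spec_careunit_to_group
  cases unit with
  | none => rfl
  | some u =>
    show careunit_to_group (some u) = careunit_to_group_alt (some u)
    by_cases hb : PySem.Set.contains icuUnits u = true
    · have hmin : PySem.List.min?
          ((cuKeywordPriority.foldr
            (fun kp acc => if PySem.Str.isIn kp.1 u then kp.2 :: acc else acc) []) ++ [0])
          (fun x => x) = some 0 := by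
        apply min?_eq_of_min
        · simp
        · intro q _; exact Nat.zero_le q
      have hmem : u ∈ icuUnits := by simpa using hb
      have hmin' := hmin
      simp at hmin'
      simp [careunit_to_group, careunit_to_group_alt, hmem, hmin', cuLabels]
    · simp only [Bool.not_eq_true] at hb
      have hbuild :
          (cuKeywordPriority.foldr
            (fun kp acc => if PySem.Str.isIn kp.1 u then kp.2 :: acc else acc) [])
          = cuBuild
              [ (PySem.Str.isIn "Intensive Care" u, 0)
              , (PySem.Str.isIn "Emergency Department" u, 1)
              , (PySem.Str.isIn "Med/Surg" u, 2), (PySem.Str.isIn "Medicine" u, 2)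
              , (PySem.Str.isIn "Labor" u, 3), (PySem.Str.isIn "Obstetric" u, 3)
              , (PySem.Str.isIn "Hematology" u, 4), (PySem.Str.isIn "Oncology" u, 4)
              , (PySem.Str.isIn "Neurology" u, 5)
              , (PySem.Str.isIn "Psychiatry" u, 6)
              , (PySem.Str.isIn "Surgery" u, 7), (PySem.Str.isIn "Vascular" u, 7)
              , (PySem.Str.isIn "Transplant" u, 7) ] := by
        simp [cuKeywordPriority, cuBuild]
      have hkey := cuKey
        [ (PySem.Str.isIn "Intensive Care" u, 0)
        , (PySem.Str.isIn "Emergency Department" u, 1)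
        , (PySem.Str.isIn "Med/Surg" u, 2), (PySem.Str.isIn "Medicine" u, 2)
        , (PySem.Str.isIn "Labor" u, 3), (PySem.Str.isIn "Obstetric" u, 3)
        , (PySem.Str.isIn "Hematology" u, 4), (PySem.Str.isIn "Oncology" u, 4)
        , (PySem.Str.isIn "Neurology" u, 5)
        , (PySem.Str.isIn "Psychiatry" u, 6)
        , (PySem.Str.isIn "Surgery" u, 7), (PySem.Str.isIn "Vascular" u, 7)
        , (PySem.Str.isIn "Transplant" u, 7) ]
        (by simp [List.pairwise_cons])
      have hkey' : careunit_to_group_alt (some u) = cuCascade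
          [ (PySem.Str.isIn "Intensive Care" u, 0)
          , (PySem.Str.isIn "Emergency Department" u, 1)
          , (PySem.Str.isIn "Med/Surg" u, 2), (PySem.Str.isIn "Medicine" u, 2)
          , (PySem.Str.isIn "Labor" u, 3), (PySem.Str.isIn "Obstetric" u, 3)
          , (PySem.Str.isIn "Hematology" u, 4), (PySem.Str.isIn "Oncology" u, 4)
          , (PySem.Str.isIn "Neurology" u, 5)
          , (PySem.Str.isIn "Psychiatry" u, 6)
          , (PySem.Str.isIn "Surgery" u, 7), (PySem.Str.isIn "Vascular" u, 7)
          , (PySem.Str.isIn "Transplant" u, 7) ] := by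
        simp only [careunit_to_group_alt, hb, Bool.false_eq_true, if_false, hbuild]
        exact hkey
      have hnm : u ∉ icuUnits := by simpa using hb
      rw [hkey']
      simp [careunit_to_group, cuCascade, cuLabels, hnm, if_or', Bool.false_or]
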